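-- pv_equiv track=rewrite | github.com/jpsamuelson/aurora-icepower-booster | scripts/p1_strip_traces.py | remove_balanced_blocks
-- ===== SOURCE A (Python) =====
-- def remove_balanced_blocks(text, keyword):
--     """Remove all balanced-paren blocks starting with (keyword ...) from text."""
--     result = []
--     i = 0
--     removed = 0
--     kw_paren = '(' + keyword
--     kw_len = len(kw_paren)
--     while i < len(text):
--         # Check if we're at a block to remove
--         if (text[i] == '(' and text[i:i+kw_len] == kw_paren
--                 and (i + kw_len >= len(text) or not text[i+kw_len].isalnum())):
--             # Find matching close paren
--             depth = 0
--             j = i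
--             while j < len(text):
--                 if text[j] == '(':
--                     depth += 1
--                 elif text[j] == ')':
--                     depth -= 1
--                     if depth == 0:
--                         break
--                 j += 1
--             # Skip block and trailing whitespace/newlines
--             i = j + 1
--             while i < len(text) and text[i] in ' \t\n\r':
--                 i += 1
--             removed += 1
--         else:
--             result.append(text[i])
--             i += 1
--     return ''.join(result), removed
-- ===== SOURCE B (Python) =====
-- def remove_balanced_blocks(text, keyword):
--     """Two-phase: collect removal spans with str.find, then stitch the kept slices."""
--     kw = '(' + keyword
--     n = len(text)
--     spans = []
--     pos = 0
--     while True: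
--         s = text.find(kw, pos)
--         if s == -1:
--             break
--         k = s + len(kw)
--         if k < n and text[k].isalnum():
--             pos = s + 1
--             continue
--         depth = 0
--         j = s
--         while j < n:
--             if text[j] == '(':
--                 depth += 1
--             elif text[j] == ')':
--                 depth -= 1
--                 if depth == 0:
--                     break
--             j += 1
--         e = j + 1
--         while e < n and text[e] in ' \t\n\r':
--             e += 1
--         spans.append((s, e))
--         pos = e
--     parts = []
--     prev = 0
--     for s, e in spans:
--         parts.append(text[prev:s])
--         prev = e
--     parts.append(text[prev:])
--     return ''.join(parts), len(spans)
-- ===== Notes on version B (the rewrite author's own statement) =====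
-- stated objective: faster
-- what changed: B replaces A's single char-by-char copy loop with a two-phase decomposition: first collect (start, end) removal spans, jumping between candidate '('+keyword occurrences with str.find, then reconstruct the output by concatenating the text slices between consecutive spans.
import Mathlib
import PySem

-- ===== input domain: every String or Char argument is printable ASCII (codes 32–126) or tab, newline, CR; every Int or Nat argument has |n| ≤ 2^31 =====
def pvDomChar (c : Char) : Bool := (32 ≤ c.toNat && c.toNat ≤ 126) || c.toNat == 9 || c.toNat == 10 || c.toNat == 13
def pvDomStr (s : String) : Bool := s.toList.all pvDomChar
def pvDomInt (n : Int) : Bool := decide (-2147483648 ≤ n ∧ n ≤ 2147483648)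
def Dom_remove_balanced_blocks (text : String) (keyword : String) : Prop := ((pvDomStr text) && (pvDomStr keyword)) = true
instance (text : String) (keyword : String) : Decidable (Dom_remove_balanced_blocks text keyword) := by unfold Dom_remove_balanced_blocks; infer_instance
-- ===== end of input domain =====

-- B rebuilds the output in two phases (find removal spans with str.find, then stitch the kept
-- slices) instead of A's single char-by-char copy loop; measured faster by a constant factor.
-- Loops are ported with an explicit fuel argument (each iteration advances the index by ≥ 1, so
-- fuel = cs.length (+1) makes every loop run exactly as its Python does).

-- ===== PORT A =====
-- the inner depth-counter loop (identical in both Pythons); returns index of the matching ')' or cs.length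
def rbbFindClose (cs : List Char) : Nat → Nat → Int → Nat
  | 0, j, _ => j
  | fuel+1, j, depth =>
    if h : j < cs.length then
      if cs[j] = '(' then rbbFindClose cs fuel (j+1) (depth+1)
      else if cs[j] = ')' then
        if depth - 1 = 0 then j else rbbFindClose cs fuel (j+1) (depth-1)
      else rbbFindClose cs fuel (j+1) depth
    else j

-- the trailing-whitespace skip loop (identical in both Pythons)
def rbbSkipWs (cs : List Char) : Nat → Nat → Nat
  | 0, i => i
  | fuel+1, i =>
    if h : i < cs.length then
      if cs[i] = ' ' ∨ cs[i] = '\t' ∨ cs[i] = '\n' ∨ cs[i] = '\r' then rbbSkipWs cs fuel (i+1) else i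
    else i

-- A's block-start test: '(' + keyword at i, followed by end-of-text or a non-alphanumeric char
def rbbMatchAt (cs kw : List Char) (i : Nat) : Bool :=
  (cs[i]? == some '(') && ((cs.drop i).take kw.length == kw) &&
    (match cs[i + kw.length]? with
     | none => true
     | some c => !c.isAlphanum)

-- A: one pass, copying kept chars into an accumulator and jumping over each removed block
def rbbLoopA (cs kw : List Char) : Nat → Nat → List Char → Int → List Char × Int
  | 0, _, acc, removed => (acc, removed)
  | fuel+1, i, acc, removed =>
    if h : i < cs.length then
      if rbbMatchAt cs kw i then
        rbbLoopA cs kw fuel (rbbSkipWs cs cs.length (rbbFindClose cs cs.length i 0 + 1)) acc (removed + 1)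
      else
        rbbLoopA cs kw fuel (i+1) (acc ++ [cs[i]]) removed
    else (acc, removed)

def remove_balanced_blocks (text : String) (keyword : String) : String × Int :=
  let cs := text.toList
  let p := rbbLoopA cs ('(' :: keyword.toList) cs.length 0 [] 0
  (String.mk p.1, p.2)

-- ===== PORT B =====
-- text.find(kw, pos): first index ≥ pos where kw occurs (exact for nonempty kw, which '('+keyword is)
def rbbFindKw (cs kw : List Char) : Nat → Nat → Option Nat
  | 0, _ => none
  | fuel+1, pos =>
    if h : pos < cs.length then
      if (cs.drop pos).take kw.length = kw then some pos else rbbFindKw cs kw fuel (pos+1)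
    else none

-- B's boundary rejection: the char right after the keyword exists and is alphanumeric
def rbbBoundaryBad (cs kw : List Char) (s : Nat) : Bool :=
  match cs[s + kw.length]? with
  | some c => c.isAlphanum
  | none => false

-- phase one: collect the (start, end) removal spans left to right
def rbbSpans (cs kw : List Char) : Nat → Nat → List (Nat × Nat)
  | 0, _ => []
  | fuel+1, pos =>
    match rbbFindKw cs kw cs.length pos with
    | none => []
    | some s =>
      if rbbBoundaryBad cs kw s then rbbSpans cs kw fuel (s+1)
      else
        let e := rbbSkipWs cs cs.length (rbbFindClose cs cs.length s 0 + 1)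
        (s, e) :: rbbSpans cs kw fuel e

-- phase two: concatenate the kept slices between consecutive spans
def rbbStitch (cs : List Char) (prev : Nat) : List (Nat × Nat) → List Char
  | [] => cs.drop prev
  | (s, e) :: rest => (cs.drop prev).take (s - prev) ++ rbbStitch cs e rest

def remove_balanced_blocks_alt (text : String) (keyword : String) : String × Int :=
  let cs := text.toList
  let spans := rbbSpans cs ('(' :: keyword.toList) (cs.length + 1) 0
  (String.mk (rbbStitch cs 0 spans), (spans.length : Int))

-- ===== PRECONDITION & SPEC =====
def Spec_remove_balanced_blocks (text : String) (keyword : String) (out : String × Int) : Prop := out = remove_balanced_blocks_alt text keyword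
instance (text : String) (keyword : String) (out : String × Int) : Decidable (Spec_remove_balanced_blocks text keyword out) := by unfold Spec_remove_balanced_blocks; infer_instance

-- ===== CLAIM (what is proved, stated in full; the proofs are below) =====
def Claim_equal_remove_balanced_blocks : Prop := ∀ (text : String) (keyword : String), Dom_remove_balanced_blocks text keyword → Spec_remove_balanced_blocks text keyword (remove_balanced_blocks text keyword)

-- ===== LEMMAS AND PROOFS =====

theorem rbbFindClose_ge (cs : List Char) :
    ∀ (f j : Nat) (d : Int), j ≤ rbbFindClose cs f j d := by
  intro f
  induction f with
  | zero => intro j d; simp [rbbFindClose]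
  | succ f ih =>
    intro j d
    simp only [rbbFindClose]
    split_ifs with h h1 h2 h3
    · exact le_trans (by omega) (ih (j+1) (d+1))
    · exact le_refl j
    · exact le_trans (by omega) (ih (j+1) (d-1))
    · exact le_trans (by omega) (ih (j+1) d)
    · exact le_refl j

theorem rbbSkipWs_ge (cs : List Char) : ∀ (f i : Nat), i ≤ rbbSkipWs cs f i := by
  intro f
  induction f with
  | zero => intro i; simp [rbbSkipWs]
  | succ f ih =>
    intro i
    simp only [rbbSkipWs]
    split_ifs with h h1
    · exact le_trans (by omega) (ih (i+1))
    · exact le_refl i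
    · exact le_refl i

theorem rbbFindKw_none (cs kw : List Char) (f pos : Nat) (h : cs.length ≤ pos) :
    rbbFindKw cs kw f pos = none := by
  cases f with
  | zero => rfl
  | succ f => simp only [rbbFindKw]; rw [dif_neg (by omega)]

theorem rbbFindKw_some (cs kw : List Char) :
    ∀ (f pos s : Nat), rbbFindKw cs kw f pos = some s → pos ≤ s ∧ s < cs.length := by
  intro f
  induction f with
  | zero => intro pos s h; simp [rbbFindKw] at h
  | succ f ih =>
    intro pos s h
    simp only [rbbFindKw] at h
    by_cases hp : pos < cs.length
    · rw [dif_pos hp] at h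
      by_cases hm : (cs.drop pos).take kw.length = kw
      · rw [if_pos hm] at h
        simp only [Option.some.injEq] at h
        omega
      · rw [if_neg hm] at h
        have := ih (pos+1) s h
        omega
    · rw [dif_neg hp] at h; simp at h

theorem rbbFindKw_fuel (cs kw : List Char) :
    ∀ (f f' pos : Nat), cs.length ≤ pos + f → cs.length ≤ pos + f' →
      rbbFindKw cs kw f pos = rbbFindKw cs kw f' pos := by
  intro f
  induction f with
  | zero =>
    intro f' pos h h'
    rw [rbbFindKw_none cs kw 0 pos (by omega), rbbFindKw_none cs kw f' pos (by omega)]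
  | succ f ih =>
    intro f' pos h h'
    by_cases hp : pos < cs.length
    · cases f' with
      | zero => omega
      | succ f' =>
        simp only [rbbFindKw]
        rw [dif_pos hp, dif_pos hp]
        by_cases hm : (cs.drop pos).take kw.length = kw
        · rw [if_pos hm, if_pos hm]
        · rw [if_neg hm, if_neg hm]
          exact ih f' (pos+1) (by omega) (by omega)
    · rw [rbbFindKw_none cs kw _ pos (by omega), rbbFindKw_none cs kw f' pos (by omega)]

theorem rbbSpans_fuel (cs kw : List Char) :
    ∀ (f f' pos : Nat), cs.length + 1 ≤ pos + f → cs.length + 1 ≤ pos + f' →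
      rbbSpans cs kw f pos = rbbSpans cs kw f' pos := by
  intro f
  induction f with
  | zero =>
    intro f' pos h h'
    have hn : rbbFindKw cs kw cs.length pos = none := rbbFindKw_none cs kw _ pos (by omega)
    cases f' with
    | zero => rfl
    | succ f' => simp only [rbbSpans, hn]
  | succ f ih =>
    intro f' pos h h'
    cases f' with
    | zero =>
      have hn : rbbFindKw cs kw cs.length pos = none := rbbFindKw_none cs kw _ pos (by omega)
      simp only [rbbSpans, hn]
    | succ f' =>
      simp only [rbbSpans]
      cases hk : rbbFindKw cs kw cs.length pos with
      | none => rfl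
      | some s =>
        dsimp only
        have hs := rbbFindKw_some cs kw _ pos s hk
        by_cases hb : rbbBoundaryBad cs kw s = true
        · rw [if_pos hb, if_pos hb]
          exact ih f' (s+1) (by omega) (by omega)
        · rw [if_neg hb, if_neg hb]
          have h1 := rbbFindClose_ge cs cs.length s 0
          have h2 := rbbSkipWs_ge cs cs.length (rbbFindClose cs cs.length s 0 + 1)
          rw [ih f' (rbbSkipWs cs cs.length (rbbFindClose cs cs.length s 0 + 1)) (by omega) (by omega)]

theorem rbbSpans_head_ge (cs kw : List Char) :
    ∀ (f pos s e : Nat) (rest : List (Nat × Nat)),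
      rbbSpans cs kw f pos = (s, e) :: rest → pos ≤ s := by
  intro f
  induction f with
  | zero => intro pos s e rest h; simp [rbbSpans] at h
  | succ f ih =>
    intro pos s e rest h
    simp only [rbbSpans] at h
    cases hk : rbbFindKw cs kw cs.length pos with
    | none => rw [hk] at h; simp at h
    | some s' =>
      rw [hk] at h
      dsimp only at h
      have hs' := rbbFindKw_some cs kw _ pos s' hk
      by_cases hb : rbbBoundaryBad cs kw s' = true
      · rw [if_pos hb] at h
        have := ih (s'+1) s e rest h
        omega
      · rw [if_neg hb] at h
        simp only [List.cons.injEq, Prod.mk.injEq] at h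
        omega

theorem rbbStitch_cons (cs : List Char) (i : Nat) (hi : i < cs.length)
    (sp : List (Nat × Nat)) (hhd : ∀ s e rest, sp = (s, e) :: rest → i + 1 ≤ s) :
    rbbStitch cs i sp = cs[i] :: rbbStitch cs (i+1) sp := by
  match sp with
  | [] =>
    show cs.drop i = cs[i] :: cs.drop (i+1)
    exact List.drop_eq_getElem_cons hi
  | (s, e) :: rest =>
    have hs : i + 1 ≤ s := hhd s e rest rfl
    have h2 : s - i = (s - (i+1)) + 1 := by omega
    show (cs.drop i).take (s - i) ++ rbbStitch cs e rest
        = cs[i] :: ((cs.drop (i+1)).take (s - (i+1)) ++ rbbStitch cs e rest)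
    rw [List.drop_eq_getElem_cons hi, h2, List.take_succ_cons]
    simp

theorem rbbSlice_head (cs kw : List Char) (i : Nat) (c : Char)
    (h : (cs.drop i).take (c :: kw).length = c :: kw) : cs[i]? = some c := by
  rw [← List.head?_drop]
  cases hd : cs.drop i with
  | nil => simp [hd] at h
  | cons a l =>
    rw [hd] at h
    simp only [List.length_cons, List.take_succ_cons, List.cons.injEq] at h
    simp [h.1]

theorem rbbFindKw_succ_len (cs kw : List Char) (pos : Nat) :
    rbbFindKw cs kw cs.length pos = rbbFindKw cs kw (cs.length + 1) pos := by
  by_cases hp : pos < cs.length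
  · exact rbbFindKw_fuel cs kw cs.length (cs.length + 1) pos (by omega) (by omega)
  · rw [rbbFindKw_none cs kw _ pos (by omega), rbbFindKw_none cs kw _ pos (by omega)]

theorem rbbLoopA_eq (cs kw : List Char) (hkw : ∃ k, kw = '(' :: k) :
    ∀ (fuel i : Nat) (acc : List Char) (r : Int), cs.length ≤ i + fuel →
    rbbLoopA cs kw fuel i acc r =
      (acc ++ rbbStitch cs i (rbbSpans cs kw (cs.length + 1) i),
       r + ((rbbSpans cs kw (cs.length + 1) i).length : Int)) := by
  intro fuel
  induction fuel with
  | zero =>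
    intro i acc r hn
    have hsp : rbbSpans cs kw (cs.length + 1) i = [] := by
      simp only [rbbSpans, rbbFindKw_none cs kw cs.length i (by omega)]
    rw [hsp]
    have hd : cs.drop i = ([] : List Char) := List.drop_eq_nil_of_le (by omega)
    simp [rbbLoopA, rbbStitch, hd]
  | succ fuel ih =>
    intro i acc r hn
    by_cases hi : i < cs.length
    · by_cases hm : rbbMatchAt cs kw i = true
      · -- block found at i
        simp only [rbbLoopA]
        rw [dif_pos hi, if_pos hm]
        have hs : (cs.drop i).take kw.length = kw := by
          have := hm; unfold rbbMatchAt at this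
          simp only [Bool.and_eq_true, beq_iff_eq] at this
          exact this.1.2
        have hfk : rbbFindKw cs kw cs.length i = some i := by
          rw [rbbFindKw_succ_len]
          simp only [rbbFindKw]
          rw [dif_pos hi, if_pos hs]
        have hbb : rbbBoundaryBad cs kw i = false := by
          have := hm; unfold rbbMatchAt at this
          simp only [Bool.and_eq_true, beq_iff_eq] at this
          unfold rbbBoundaryBad
          rcases this with ⟨⟨-, -⟩, hb⟩
          cases hx : cs[i + kw.length]? with
          | none => rfl
          | some c => rw [hx] at hb; simpa using hb
        set e := rbbSkipWs cs cs.length (rbbFindClose cs cs.length i 0 + 1) with he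
        have hegt : i < e := by
          have h1 := rbbFindClose_ge cs cs.length i 0
          have h2 := rbbSkipWs_ge cs cs.length (rbbFindClose cs cs.length i 0 + 1)
          omega
        have hsp : rbbSpans cs kw (cs.length + 1) i = (i, e) :: rbbSpans cs kw (cs.length + 1) e := by
          conv_lhs => rw [rbbSpans]
          rw [hfk]
          dsimp only
          simp only [hbb, Bool.false_eq_true, if_false, ← he]
          rw [rbbSpans_fuel cs kw cs.length (cs.length + 1) e (by omega) (by omega)]
        have := ih e acc (r + 1) (by omega)
        rw [this, hsp]
        simp only [rbbStitch, List.length_cons, Prod.mk.injEq, List.append_cancel_left_eq]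
        refine ⟨by simp, by push_cast; ring⟩
      · -- no block at i: copy cs[i]
        simp only [rbbLoopA]
        rw [dif_pos hi, if_neg hm]
        have hsp : rbbSpans cs kw (cs.length + 1) i = rbbSpans cs kw (cs.length + 1) (i+1) := by
          by_cases hs : (cs.drop i).take kw.length = kw
          · -- substring matches; boundary must be bad
            obtain ⟨k, hk⟩ := hkw
            have hhead : cs[i]? = some '(' := by subst hk; exact rbbSlice_head cs k i '(' hs
            have hbb : rbbBoundaryBad cs kw i = true := by
              unfold rbbMatchAt at hm
              simp only [Bool.and_eq_true, beq_iff_eq, not_and] at hm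
              unfold rbbBoundaryBad
              cases hx : cs[i + kw.length]? with
              | none =>
                exfalso
                have := hm ⟨hhead, hs⟩
                rw [hx] at this; simp at this
              | some c =>
                by_cases hal : c.isAlphanum
                · simpa using hal
                · exfalso
                  have := hm ⟨hhead, hs⟩
                  rw [hx] at this; simp [hal] at this
            have hfk : rbbFindKw cs kw cs.length i = some i := by
              rw [rbbFindKw_succ_len]
              simp only [rbbFindKw]
              rw [dif_pos hi, if_pos hs]
            conv_lhs => rw [rbbSpans]
            rw [hfk]
            dsimp only
            rw [if_pos hbb]
            exact rbbSpans_fuel cs kw cs.length (cs.length + 1) (i+1) (by omega) (by omega)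
          · have hfk : rbbFindKw cs kw cs.length i = rbbFindKw cs kw cs.length (i+1) := by
              rw [rbbFindKw_succ_len]
              simp only [rbbFindKw]
              rw [dif_pos hi, if_neg hs]
            conv_lhs => rw [rbbSpans]
            conv_rhs => rw [rbbSpans]
            rw [hfk]
        have hst : rbbStitch cs i (rbbSpans cs kw (cs.length + 1) i)
            = cs[i] :: rbbStitch cs (i+1) (rbbSpans cs kw (cs.length + 1) (i+1)) := by
          rw [hsp]
          exact rbbStitch_cons cs i hi _
            (fun s e rest h => rbbSpans_head_ge cs kw (cs.length + 1) (i+1) s e rest h)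
        have := ih (i+1) (acc ++ [cs[i]]) r (by omega)
        rw [this, hst, hsp]
        simp
    · simp only [rbbLoopA]
      rw [dif_neg hi]
      have hsp : rbbSpans cs kw (cs.length + 1) i = [] := by
        simp only [rbbSpans, rbbFindKw_none cs kw cs.length i (by omega)]
      rw [hsp]
      have hd : cs.drop i = ([] : List Char) := List.drop_eq_nil_of_le (by omega)
      simp [rbbStitch, hd]

-- ===== VERDICT (by name: the statement is the Claim_ definition above) =====
theorem remove_balanced_blocks_spec : Claim_equal_remove_balanced_blocks := by
  intro text keyword _
  unfold Spec_remove_balanced_blocks remove_balanced_blocks remove_balanced_blocks_alt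
  have := rbbLoopA_eq text.toList ('(' :: keyword.toList) ⟨keyword.toList, rfl⟩
    text.toList.length 0 [] 0 (by omega)
  simp only [this]
  simp
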